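-- pv_equiv track=rewrite | github.com/thomascassidyzm/ssi-dashboard-v7 | vfs/courses/ita_for_eng_30seeds/generate_baskets_final.py | extract_d_phrases_fixed
-- ===== SOURCE A (Python) =====
-- def extract_d_phrases_fixed(e_phrases, operative_lego):
--     """Extract 2-5 word windows containing the operative LEGO with proper alignment"""
--     d = {"2": [], "3": [], "4": [], "5": []}
--
--     for ep_t, ep_k in e_phrases:
--         # Remove punctuation
--         t_clean = ep_t.replace('.', '').replace('?', '').replace('!', '').replace(',', '')
--         k_clean = ep_k.replace('.', '').replace('?', '').replace('!', '').replace(',', '')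
--
--         t_words = t_clean.split()
--         k_words = k_clean.split()
--
--         # Only extract if we have same number of "chunks" (approximate alignment)
--         # For simplicity, we'll extract from target and assume alignment
--
--         for size in [2, 3, 4, 5]:
--             if len(d[str(size)]) >= 2:
--                 continue
--
--             for i in range(len(t_words) - size + 1):
--                 win_t = ' '.join(t_words[i:i+size])
--
--                 # Check if operative LEGO is in this window
--                 if operative_lego.lower() in win_t.lower():
--                     # Try to find corresponding English window
--                     # For simplicity, use same index range
--                     if i + size <= len(k_words):
--                         win_k = ' '.join(k_words[i:i+size])
--                         phrase = [win_t, win_k]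
--
--                         if phrase not in d[str(size)]:
--                             d[str(size)].append(phrase)
--                             if len(d[str(size)]) >= 2:
--                                 break
--
--     return d
-- ===== SOURCE B (Python) =====
-- def _clean_words(s):
--     for ch in '.?!,':
--         s = s.replace(ch, '')
--     return s.split()
--
--
-- def extract_d_phrases_fixed(e_phrases, operative_lego):
--     """Extract 2-5 word windows containing the operative LEGO with proper alignment"""
--     op = operative_lego.lower()
--     d = {}
--     for size in (2, 3, 4, 5):
--         cands = []
--         for ep_t, ep_k in e_phrases:
--             t_words = _clean_words(ep_t)
--             k_words = _clean_words(ep_k)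
--             for i in range(len(t_words) - size + 1):
--                 win_t = ' '.join(t_words[i:i + size])
--                 if op in win_t.lower() and i + size <= len(k_words):
--                     cands.append([win_t, ' '.join(k_words[i:i + size])])
--         uniq = []
--         for c in cands:
--             if c not in uniq:
--                 uniq.append(c)
--         d[str(size)] = uniq[:2]
--     return d
-- ===== Notes on version B (the rewrite author's own statement) =====
-- stated objective: alternative
-- what changed: Inverts the loop nest and removes the mutable shared dict: instead of updating d phrase-by-phrase with continue/break early exits, B works size-by-size, enumerating every matching window into a candidate list, then deduplicates preserving first-occurrence order and truncates to two.
import Mathlib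
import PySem

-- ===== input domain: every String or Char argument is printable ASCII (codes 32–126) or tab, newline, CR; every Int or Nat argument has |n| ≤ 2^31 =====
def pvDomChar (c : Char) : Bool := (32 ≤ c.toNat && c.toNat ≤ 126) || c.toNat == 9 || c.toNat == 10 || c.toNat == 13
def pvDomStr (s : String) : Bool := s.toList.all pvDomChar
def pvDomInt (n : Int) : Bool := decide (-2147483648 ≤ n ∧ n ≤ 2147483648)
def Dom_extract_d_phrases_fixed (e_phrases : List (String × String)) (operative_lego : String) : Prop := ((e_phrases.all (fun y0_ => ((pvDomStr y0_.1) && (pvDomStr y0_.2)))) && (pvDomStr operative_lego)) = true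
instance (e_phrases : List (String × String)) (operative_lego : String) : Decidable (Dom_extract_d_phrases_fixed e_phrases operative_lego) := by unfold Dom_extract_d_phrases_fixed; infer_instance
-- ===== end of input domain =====

-- B replaces A's phrase-outer mutable-dict accumulation (with continue/break early exits) by a
-- size-outer enumerate-all-candidates / ordered-dedup / take-two pipeline; same result, similar cost.

-- ===== PORT A =====
-- s.replace('.','').replace('?','').replace('!','').replace(',','')
def pvCleanA (s : String) : String :=
  PySem.Str.replace (PySem.Str.replace (PySem.Str.replace (PySem.Str.replace s "." "") "?" "") "!" "") "," ""

-- the `for i in range(len(t_words) - size + 1)` loop for one phrase and one size, with its break;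
-- the state is the list d[str(size)] that the Python appends to
def pvInnerA (operative_lego : String) (t_words k_words : List String) (size : Int) :
    List (List String) → List Int → List (List String)
  | l, [] => l
  | l, i :: rest =>
    let win_t := PySem.Str.join " " (PySem.List.slice t_words (some i) (some (i + size)))
    if PySem.Str.isIn (PySem.Str.lower operative_lego) (PySem.Str.lower win_t) then
      if i + size ≤ (k_words.length : Int) then
        let win_k := PySem.Str.join " " (PySem.List.slice k_words (some i) (some (i + size)))
        let phrase := [win_t, win_k]
        if phrase ∈ l then pvInnerA operative_lego t_words k_words size l rest
        else
          let l' := l ++ [phrase]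
          if 2 ≤ l'.length then l'
          else pvInnerA operative_lego t_words k_words size l' rest
      else pvInnerA operative_lego t_words k_words size l rest
    else pvInnerA operative_lego t_words k_words size l rest

-- body of `for size in [2, 3, 4, 5]:` — the key "str(size)" is always present in d, so d[str(size)] = getD
def pvStepSizeA (operative_lego : String) (t_words k_words : List String)
    (d : PySem.Dict String (List (List String))) (size : Int) : PySem.Dict String (List (List String)) :=
  if 2 ≤ (d.getD (PySem.Int.toStr size) []).length then d
  else d.insert (PySem.Int.toStr size)
    (pvInnerA operative_lego t_words k_words size (d.getD (PySem.Int.toStr size) [])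
      (PySem.List.pyRange 0 ((t_words.length : Int) - size + 1) 1))

-- body of `for ep_t, ep_k in e_phrases:`
def pvPhraseStepA (operative_lego : String) (d : PySem.Dict String (List (List String)))
    (p : String × String) : PySem.Dict String (List (List String)) :=
  let t_words := PySem.Str.split₀ (pvCleanA p.1)
  let k_words := PySem.Str.split₀ (pvCleanA p.2)
  ([2, 3, 4, 5] : List Int).foldl (fun d size => pvStepSizeA operative_lego t_words k_words d size) d

def extract_d_phrases_fixed (e_phrases : List (String × String)) (operative_lego : String) :
    List (String × List (List String)) :=
  (e_phrases.foldl (pvPhraseStepA operative_lego)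
    (PySem.Dict.ofList [("2", []), ("3", []), ("4", []), ("5", [])])).items

-- ===== PORT B =====
-- _clean_words: `for ch in '.?!,': s = s.replace(ch, '')` then split()
def pvCleanB (s : String) : String :=
  (["." , "?", "!", ","] : List String).foldl (fun s ch => PySem.Str.replace s ch "") s

def pvWordsB (s : String) : List String := PySem.Str.split₀ (pvCleanB s)

-- one window candidate: `if op in win_t.lower() and i + size <= len(k_words)`
def pvWinF (op : String) (t_words k_words : List String) (size : Int) (i : Int) :
    Option (List String) :=
  let win_t := PySem.Str.join " " (PySem.List.slice t_words (some i) (some (i + size)))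
  if PySem.Str.isIn op (PySem.Str.lower win_t) && decide (i + size ≤ (k_words.length : Int)) then
    some [win_t, PySem.Str.join " " (PySem.List.slice k_words (some i) (some (i + size)))]
  else none

-- the candidate list for one size: the two nested loops appending into `cands`
def pvCandsB (op : String) (size : Int) (e_phrases : List (String × String)) : List (List String) :=
  e_phrases.flatMap (fun p =>
    (PySem.List.pyRange 0 (((pvWordsB p.1).length : Int) - size + 1) 1).filterMap
      (pvWinF op (pvWordsB p.1) (pvWordsB p.2) size))

-- the `uniq` not-in/append loop is PySem.Set.ofList (ordered dedup); `uniq[:2]` is the slice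
def extract_d_phrases_fixed_alt (e_phrases : List (String × String)) (operative_lego : String) :
    List (String × List (List String)) :=
  let op := PySem.Str.lower operative_lego
  ([2, 3, 4, 5] : List Int).map (fun size =>
    (PySem.Int.toStr size,
     PySem.List.slice (PySem.Set.ofList (pvCandsB op size e_phrases)) none (some 2)))

-- ===== PRECONDITION & SPEC =====
def Spec_extract_d_phrases_fixed (e_phrases : List (String × String)) (operative_lego : String) (out : List (String × List (List String))) : Prop := out = extract_d_phrases_fixed_alt e_phrases operative_lego
instance (e_phrases : List (String × String)) (operative_lego : String) (out : List (String × List (List String))) : Decidable (Spec_extract_d_phrases_fixed e_phrases operative_lego out) := by unfold Spec_extract_d_phrases_fixed; infer_instance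

-- ===== CLAIM (what is proved, stated in full; the proofs are below) =====
def Claim_equal_extract_d_phrases_fixed : Prop := ∀ (e_phrases : List (String × String)) (operative_lego : String), Dom_extract_d_phrases_fixed e_phrases operative_lego → Spec_extract_d_phrases_fixed e_phrases operative_lego (extract_d_phrases_fixed e_phrases operative_lego)

-- ===== LEMMAS AND PROOFS =====

-- abstract "append first-occurrences, capped at two" accumulator
def pvCap2 : List (List String) → List (List String) → List (List String)
  | l, [] => l
  | l, c :: cs => if 2 ≤ l.length then l else if c ∈ l then pvCap2 l cs else pvCap2 (l ++ [c]) cs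

theorem pvCap2_of_le (l cs : List (List String)) (h : 2 ≤ l.length) : pvCap2 l cs = l := by
  cases cs <;> simp [pvCap2, h]

theorem pvCap2_len (l cs : List (List String)) (h : l.length ≤ 2) : (pvCap2 l cs).length ≤ 2 := by
  induction cs generalizing l with
  | nil => simpa [pvCap2] using h
  | cons c cs ih =>
    simp only [pvCap2]
    split_ifs with h1 h2
    · exact h
    · exact ih l h
    · exact ih (l ++ [c]) (by simp; omega)

theorem pvCap2_append (l cs cs' : List (List String)) :
    pvCap2 l (cs ++ cs') = pvCap2 (pvCap2 l cs) cs' := by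
  induction cs generalizing l with
  | nil => simp [pvCap2]
  | cons c cs ih =>
    simp only [List.cons_append, pvCap2]
    split_ifs with h1 h2
    · exact (pvCap2_of_le l cs' h1).symm
    · exact ih l
    · exact ih (l ++ [c])

-- ordered dedup then take-2 equals the capped accumulator
theorem pvUpdate_take2 (cs : List (List String)) (acc : List (List String)) (h : acc.length ≤ 2) :
    (PySem.Set.update acc cs).take 2 = pvCap2 acc cs := by
  induction cs generalizing acc with
  | nil =>
    simp [PySem.Set.update, pvCap2, List.take_of_length_le h]
  | cons c cs ih =>
    simp only [pvCap2]
    split_ifs with h1 h2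
    · -- acc already has two elements: update only appends, take 2 gives acc back
      have hlen : acc.length = 2 := le_antisymm h h1
      rw [PySem.Set.update_eq_append_filter]
      rw [List.take_append_of_le_length (by omega)]
      exact List.take_of_length_le (by omega)
    · rw [show PySem.Set.update acc (c :: cs) = PySem.Set.update (PySem.Set.add acc c) cs from rfl]
      have ha : PySem.Set.add acc c = acc := by
        simp [PySem.Set.add, PySem.Set.contains_eq_listContains, h2]
      rw [ha]; exact ih acc h
    · rw [show PySem.Set.update acc (c :: cs) = PySem.Set.update (PySem.Set.add acc c) cs from rfl]
      have ha : PySem.Set.add acc c = acc ++ [c] := by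
        simp [PySem.Set.add, PySem.Set.contains_eq_listContains, h2]
      rw [ha]; exact ih (acc ++ [c]) (by simp; omega)

theorem pvOfList_take2 (cs : List (List String)) :
    (PySem.Set.ofList cs).take 2 = pvCap2 [] cs := by
  have h : PySem.Set.ofList cs = PySem.Set.update [] cs := by
    simp [PySem.Set.ofList_eq_foldl, PySem.Set.update]
  rw [h]; exact pvUpdate_take2 cs [] (by simp)

-- A's inner range loop is the capped accumulator over B's per-phrase candidates
theorem pvInnerA_eq (ol : String) (tw kw : List String) (size : Int) :
    ∀ (idxs : List Int) (l : List (List String)), l.length ≤ 1 →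
    pvInnerA ol tw kw size l idxs =
      pvCap2 l (idxs.filterMap (pvWinF (PySem.Str.lower ol) tw kw size)) := by
  intro idxs
  induction idxs with
  | nil => intro l _; simp [pvInnerA, pvCap2]
  | cons i rest ih =>
    intro l hl
    simp only [pvInnerA, pvWinF, List.filterMap_cons]
    by_cases h1 : PySem.Str.isIn (PySem.Str.lower ol)
        (PySem.Str.lower (PySem.Str.join " " (PySem.List.slice tw (some i) (some (i + size))))) = true
    · by_cases h2 : i + size ≤ (kw.length : Int)
      · have hb : (PySem.Str.isIn (PySem.Str.lower ol)
            (PySem.Str.lower (PySem.Str.join " " (PySem.List.slice tw (some i) (some (i + size))))) &&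
            decide (i + size ≤ (kw.length : Int))) = true := by
          simp only [Bool.and_eq_true, decide_eq_true_eq]
          exact ⟨h1, h2⟩
        rw [if_pos h1, if_pos h2, if_pos hb]
        simp only [pvCap2]
        rw [if_neg (by omega : ¬ 2 ≤ l.length)]
        by_cases h3 : [PySem.Str.join " " (PySem.List.slice tw (some i) (some (i + size))),
            PySem.Str.join " " (PySem.List.slice kw (some i) (some (i + size)))] ∈ l
        · rw [if_pos h3, if_pos h3]
          exact ih l hl
        · rw [if_neg h3, if_neg h3]
          by_cases hc : 2 ≤ (l ++ [[PySem.Str.join " " (PySem.List.slice tw (some i) (some (i + size))),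
              PySem.Str.join " " (PySem.List.slice kw (some i) (some (i + size)))]]).length
          · rw [if_pos hc]
            exact (pvCap2_of_le _ _ hc).symm
          · rw [if_neg hc]
            have hlen : (l ++ [[PySem.Str.join " " (PySem.List.slice tw (some i) (some (i + size))),
                PySem.Str.join " " (PySem.List.slice kw (some i) (some (i + size)))]]).length = l.length + 1 := by
              simp
            rw [hlen] at hc
            exact ih _ (by rw [hlen]; omega)
      · have hb : ¬ ((PySem.Str.isIn (PySem.Str.lower ol)
            (PySem.Str.lower (PySem.Str.join " " (PySem.List.slice tw (some i) (some (i + size))))) &&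
            decide (i + size ≤ (kw.length : Int))) = true) := by
          simp only [Bool.and_eq_true, decide_eq_true_eq, not_and]
          exact fun _ => h2
        rw [if_pos h1, if_neg h2, if_neg hb]
        exact ih l hl
    · have hb : ¬ ((PySem.Str.isIn (PySem.Str.lower ol)
          (PySem.Str.lower (PySem.Str.join " " (PySem.List.slice tw (some i) (some (i + size))))) &&
          decide (i + size ≤ (kw.length : Int))) = true) := by
        simp only [Bool.and_eq_true, not_and]
        exact fun hc _ => h1 hc
      rw [if_neg h1, if_neg hb]
      exact ih l hl

-- the two cleaners agree (B's fold over '.?!,' unfolds to A's chained replaces)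
theorem pvClean_eq (s : String) : pvCleanB s = pvCleanA s := rfl

-- the four-key dict in canonical shape
def pvMkD (l2 l3 l4 l5 : List (List String)) : PySem.Dict String (List (List String)) :=
  PySem.Dict.mk [("2", l2), ("3", l3), ("4", l4), ("5", l5)]

-- one size step on the canonical dict (the continue-guard folded into an if)
theorem pvStep2 (ol : String) (tw kw : List String) (l2 l3 l4 l5 : List (List String)) :
    pvStepSizeA ol tw kw (pvMkD l2 l3 l4 l5) 2 =
    pvMkD (if 2 ≤ l2.length then l2
           else pvInnerA ol tw kw 2 l2 (PySem.List.pyRange 0 ((tw.length : Int) - 2 + 1) 1)) l3 l4 l5 := by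
  have hk : PySem.Int.toStr 2 = "2" := by decide
  have hg : (pvMkD l2 l3 l4 l5).getD "2" [] = l2 := by
    simp [pvMkD, PySem.Dict.getD_eq_get?_getD, PySem.Dict.get?_mk_cons]
  unfold pvStepSizeA
  rw [hk, hg]
  split_ifs with h
  · rfl
  · apply PySem.Dict.ext
    rw [PySem.Dict.items_insert_of_contains]
    · simp [pvMkD]
    · simp [pvMkD, PySem.Dict.contains_mk]

theorem pvStep3 (ol : String) (tw kw : List String) (l2 l3 l4 l5 : List (List String)) :
    pvStepSizeA ol tw kw (pvMkD l2 l3 l4 l5) 3 =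
    pvMkD l2 (if 2 ≤ l3.length then l3
           else pvInnerA ol tw kw 3 l3 (PySem.List.pyRange 0 ((tw.length : Int) - 3 + 1) 1)) l4 l5 := by
  have hk : PySem.Int.toStr 3 = "3" := by decide
  have hg : (pvMkD l2 l3 l4 l5).getD "3" [] = l3 := by
    simp [pvMkD, PySem.Dict.getD_eq_get?_getD, PySem.Dict.get?_mk_cons]
  unfold pvStepSizeA
  rw [hk, hg]
  split_ifs with h
  · rfl
  · apply PySem.Dict.ext
    rw [PySem.Dict.items_insert_of_contains]
    · simp [pvMkD]
    · simp [pvMkD, PySem.Dict.contains_mk]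

theorem pvStep4 (ol : String) (tw kw : List String) (l2 l3 l4 l5 : List (List String)) :
    pvStepSizeA ol tw kw (pvMkD l2 l3 l4 l5) 4 =
    pvMkD l2 l3 (if 2 ≤ l4.length then l4
           else pvInnerA ol tw kw 4 l4 (PySem.List.pyRange 0 ((tw.length : Int) - 4 + 1) 1)) l5 := by
  have hk : PySem.Int.toStr 4 = "4" := by decide
  have hg : (pvMkD l2 l3 l4 l5).getD "4" [] = l4 := by
    simp [pvMkD, PySem.Dict.getD_eq_get?_getD, PySem.Dict.get?_mk_cons]
  unfold pvStepSizeA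
  rw [hk, hg]
  split_ifs with h
  · rfl
  · apply PySem.Dict.ext
    rw [PySem.Dict.items_insert_of_contains]
    · simp [pvMkD]
    · simp [pvMkD, PySem.Dict.contains_mk]

theorem pvStep5 (ol : String) (tw kw : List String) (l2 l3 l4 l5 : List (List String)) :
    pvStepSizeA ol tw kw (pvMkD l2 l3 l4 l5) 5 =
    pvMkD l2 l3 l4 (if 2 ≤ l5.length then l5
           else pvInnerA ol tw kw 5 l5 (PySem.List.pyRange 0 ((tw.length : Int) - 5 + 1) 1)) := by
  have hk : PySem.Int.toStr 5 = "5" := by decide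
  have hg : (pvMkD l2 l3 l4 l5).getD "5" [] = l5 := by
    simp [pvMkD, PySem.Dict.getD_eq_get?_getD, PySem.Dict.get?_mk_cons]
  unfold pvStepSizeA
  rw [hk, hg]
  split_ifs with h
  · rfl
  · apply PySem.Dict.ext
    rw [PySem.Dict.items_insert_of_contains]
    · simp [pvMkD]
    · simp [pvMkD, PySem.Dict.contains_mk]

-- B's per-phrase candidate list for one size
def pvPC (ol : String) (size : Int) (p : String × String) : List (List String) :=
  (PySem.List.pyRange 0 (((pvWordsB p.1).length : Int) - size + 1) 1).filterMap
    (pvWinF (PySem.Str.lower ol) (pvWordsB p.1) (pvWordsB p.2) size)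

-- the per-size update performed by one phrase equals the capped accumulator over its candidates
theorem pvPhraseUpd (ol : String) (p : String × String) (size : Int) (l : List (List String))
    (h : l.length ≤ 2) :
    (if 2 ≤ l.length then l
     else pvInnerA ol (pvWordsB p.1) (pvWordsB p.2) size l
       (PySem.List.pyRange 0 (((pvWordsB p.1).length : Int) - size + 1) 1)) =
    pvCap2 l (pvPC ol size p) := by
  split_ifs with hge
  · exact (pvCap2_of_le _ _ hge).symm
  · exact pvInnerA_eq ol (pvWordsB p.1) (pvWordsB p.2) size _ l (by omega)

theorem pvPhraseStepA_mk (ol : String) (p : String × String) (l2 l3 l4 l5 : List (List String))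
    (h2 : l2.length ≤ 2) (h3 : l3.length ≤ 2) (h4 : l4.length ≤ 2) (h5 : l5.length ≤ 2) :
    pvPhraseStepA ol (pvMkD l2 l3 l4 l5) p =
    pvMkD (pvCap2 l2 (pvPC ol 2 p)) (pvCap2 l3 (pvPC ol 3 p))
          (pvCap2 l4 (pvPC ol 4 p)) (pvCap2 l5 (pvPC ol 5 p)) := by
  unfold pvPhraseStepA
  simp only [List.foldl_cons, List.foldl_nil]
  rw [show PySem.Str.split₀ (pvCleanA p.1) = pvWordsB p.1 from (congrArg _ (pvClean_eq p.1)).symm,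
      show PySem.Str.split₀ (pvCleanA p.2) = pvWordsB p.2 from (congrArg _ (pvClean_eq p.2)).symm]
  rw [pvStep2, pvPhraseUpd ol p 2 l2 h2,
      pvStep3, pvPhraseUpd ol p 3 l3 h3,
      pvStep4, pvPhraseUpd ol p 4 l4 h4,
      pvStep5, pvPhraseUpd ol p 5 l5 h5]

-- the whole phrase fold
theorem pvFoldA (ol : String) :
    ∀ (e : List (String × String)) (l2 l3 l4 l5 : List (List String)),
    l2.length ≤ 2 → l3.length ≤ 2 → l4.length ≤ 2 → l5.length ≤ 2 →
    e.foldl (pvPhraseStepA ol) (pvMkD l2 l3 l4 l5) =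
    pvMkD (pvCap2 l2 (e.flatMap (pvPC ol 2))) (pvCap2 l3 (e.flatMap (pvPC ol 3)))
          (pvCap2 l4 (e.flatMap (pvPC ol 4))) (pvCap2 l5 (e.flatMap (pvPC ol 5))) := by
  intro e
  induction e with
  | nil => intro l2 l3 l4 l5 _ _ _ _; simp [pvCap2]
  | cons p e ih =>
    intro l2 l3 l4 l5 h2 h3 h4 h5
    rw [List.foldl_cons, pvPhraseStepA_mk ol p l2 l3 l4 l5 h2 h3 h4 h5,
        ih _ _ _ _ (pvCap2_len _ _ h2) (pvCap2_len _ _ h3) (pvCap2_len _ _ h4) (pvCap2_len _ _ h5)]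
    simp only [List.flatMap_cons, pvCap2_append]

theorem pvCands_flatMap (ol : String) (size : Int) (e : List (String × String)) :
    pvCandsB (PySem.Str.lower ol) size e = e.flatMap (pvPC ol size) := rfl

-- ===== VERDICT (by name: the statement is the Claim_ definition above) =====
theorem extract_d_phrases_fixed_spec : Claim_equal_extract_d_phrases_fixed := by
  intro e ol _
  unfold Spec_extract_d_phrases_fixed
  unfold extract_d_phrases_fixed extract_d_phrases_fixed_alt
  have h0 : PySem.Dict.ofList [("2", ([] : List (List String))), ("3", []), ("4", []), ("5", [])] =
      pvMkD [] [] [] [] := by decide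
  rw [h0, pvFoldA ol e [] [] [] [] (by simp) (by simp) (by simp) (by simp)]
  simp only [List.map_cons, List.map_nil]
  have hs : ∀ cs : List (List String),
      PySem.List.slice (PySem.Set.ofList cs) none (some 2) = pvCap2 [] cs := by
    intro cs
    rw [PySem.List.slice_to _ (by norm_num)]
    simpa using pvOfList_take2 cs
  rw [hs, hs, hs, hs]
  simp only [pvCands_flatMap]
  simp [pvMkD]
  refine ⟨by decide, by decide, by decide, by decide⟩
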